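-- pv_equiv track=rewrite | github.com/Daeh0f/capybara | utils/demo-obfuscation/Pseudoloop/pseudoloop.py | search_isolated_graph
-- ===== SOURCE A (Python) =====
-- def deep_in(lst, element):
--     for i in lst:
--         if element in i:
--             return True
--     return False
--
-- def search_isolated_graph(ways):
--     list_of_OIOO = set()
--     for path in ways:
--         for node in path:
--             ways_with_node = [way for way in ways if node in way]
--             ways_without_node = [way for way in ways if node not in way]
--             if len(ways_with_node) > 1:
--                 for next_node in path[path.index(node)+1:]:
--                     is_check = True
--                     for way in ways_with_node:
--                         try:
--                             way.index(next_node)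
--                         except:
--                             is_check = False
--                             break
--                     if is_check and not deep_in(ways_without_node, next_node) and node != next_node:
--                         list_of_OIOO.add((node, next_node))
--             else:
--                 for next_node in path[path.index(node)+1:]:
--                     is_check = True
--                     for way in ways_without_node:
--                         try:
--                             way.index(next_node)
--                             is_check = False
--                             break
--                         except:
--                             continue
--                     if is_check and node != next_node:
--                         list_of_OIOO.add((node, next_node))
--     return list_of_OIOO
-- ===== SOURCE B (Python) =====
-- def search_isolated_graph(ways):
--     # Precompute node -> set of indices of ways containing it; a pair (node, next)
--     # qualifies iff next appears after node's first occurrence in some path,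
--     # next != node, and both nodes occur in exactly the same ways.
--     occ = {}
--     for i, way in enumerate(ways):
--         for node in way:
--             occ.setdefault(node, set()).add(i)
--     res = set()
--     for path in ways:
--         seen = set()
--         for j, node in enumerate(path):
--             if node in seen:
--                 continue
--             seen.add(node)
--             o = occ[node]
--             for next_node in path[j + 1:]:
--                 if next_node != node and occ[next_node] == o:
--                     res.add((node, next_node))
--     return res
-- ===== Notes on version B (the rewrite author's own statement) =====
-- stated objective: faster
-- what changed: Replaces the per-node rescans of all ways (filter with/without, linear way.index probes per candidate pair) by one precomputed node->set-of-way-indices dict, so each candidate pair is decided by a single set-equality comparison; duplicate nodes in a path are skipped via a seen-set instead of recomputing the same pairs.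
import Mathlib
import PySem

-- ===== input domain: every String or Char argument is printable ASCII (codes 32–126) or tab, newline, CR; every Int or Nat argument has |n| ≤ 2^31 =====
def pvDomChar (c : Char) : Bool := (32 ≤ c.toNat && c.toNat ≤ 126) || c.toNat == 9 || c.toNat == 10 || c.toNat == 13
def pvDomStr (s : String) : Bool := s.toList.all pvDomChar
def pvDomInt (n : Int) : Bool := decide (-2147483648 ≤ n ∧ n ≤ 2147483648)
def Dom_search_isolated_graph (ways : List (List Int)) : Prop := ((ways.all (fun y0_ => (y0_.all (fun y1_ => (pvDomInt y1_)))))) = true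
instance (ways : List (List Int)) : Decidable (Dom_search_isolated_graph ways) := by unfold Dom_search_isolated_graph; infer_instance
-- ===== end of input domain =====

-- B replaces A's per-node rescans of all ways by one precomputed node -> set-of-way-indices
-- dict, deciding each candidate pair by a single set-equality comparison (objective: faster).

-- ===== PORT A =====
def deep_in (lst : List (List Int)) (element : Int) : Bool :=
  lst.any (fun i => i.contains element)

def search_isolated_graph (ways : List (List Int)) : List (Int × Int) :=
  ways.foldl (fun acc path =>
    path.foldl (fun acc node =>
      let ways_with_node := ways.filter (fun way => way.contains node)
      let ways_without_node := ways.filter (fun way => !way.contains node)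
      -- path.index(node): node ∈ path here, so index? is some; getD 0 is never the default
      let idx : Nat := (PySem.List.index? path node).getD 0
      if ways_with_node.length > 1 then
        (PySem.List.slice path (some ((idx : Int) + 1)) none).foldl (fun acc next_node =>
          let is_check := ways_with_node.all (fun way => (PySem.List.index? way next_node).isSome)
          if is_check && !(deep_in ways_without_node next_node) && node != next_node then
            PySem.Set.add acc (node, next_node)
          else acc) acc
      else
        (PySem.List.slice path (some ((idx : Int) + 1)) none).foldl (fun acc next_node =>
          let is_check := !(ways_without_node.any (fun way => (PySem.List.index? way next_node).isSome))
          if is_check && node != next_node then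
            PySem.Set.add acc (node, next_node)
          else acc) acc) acc) PySem.Set.empty

-- ===== PORT B =====
-- occ = {}; for i, way in enumerate(ways): for node in way: occ.setdefault(node, set()).add(i)
def sig_occ (ways : List (List Int)) : PySem.Dict Int (PySem.Set Int) :=
  (PySem.List.enumerate ways 0).foldl (fun d p =>
    p.2.foldl (fun d node =>
      d.insert node (PySem.Set.add (d.getD node PySem.Set.empty) p.1)) d)
    PySem.Dict.empty

def search_isolated_graph_alt (ways : List (List Int)) : List (Int × Int) :=
  let occ := sig_occ ways
  ways.foldl (fun res path =>
    ((PySem.List.enumerate path 0).foldl (fun st p =>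
      if PySem.Set.contains st.2 p.2 then st
      else
        -- occ[node]: node ∈ path so the key is present; the default is never taken
        let o := occ.getD p.2 PySem.Set.empty
        ((PySem.List.slice path (some (p.1 + 1)) none).foldl (fun res next_node =>
            if next_node != p.2 && PySem.Set.equal (occ.getD next_node PySem.Set.empty) o then
              PySem.Set.add res (p.2, next_node)
            else res) st.1,
         PySem.Set.add st.2 p.2)) (res, PySem.Set.empty)).1) PySem.Set.empty

-- ===== PRECONDITION & SPEC =====
def Spec_search_isolated_graph (ways : List (List Int)) (out : List (Int × Int)) : Prop := out = search_isolated_graph_alt ways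
instance (ways : List (List Int)) (out : List (Int × Int)) : Decidable (Spec_search_isolated_graph ways out) := by unfold Spec_search_isolated_graph; infer_instance

-- ===== CLAIM (what is proved, stated in full; the proofs are below) =====
def Claim_equal_search_isolated_graph : Prop := ∀ (ways : List (List Int)), Dom_search_isolated_graph ways → Spec_search_isolated_graph ways (search_isolated_graph ways)

-- ===== LEMMAS AND PROOFS =====

-- the common characterisation: next ≠ node and node, next occur in exactly the same ways
def sigCond (ways : List (List Int)) (node next : Int) : Bool :=
  next != node && ways.all (fun w => w.contains node == w.contains next)

-- the pairs emitted for `node` from the tail of `path` after position j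
def sigEmit (ways : List (List Int)) (path : List Int) (j : Nat) (node : Int) : List (Int × Int) :=
  ((path.drop (j + 1)).filter (sigCond ways node)).map (fun next => (node, next))

lemma sig_occ_inner (way : List Int) (i : Int) (d : PySem.Dict Int (PySem.Set Int)) (x : Int) :
    (way.foldl (fun d node => d.insert node (PySem.Set.add (d.getD node PySem.Set.empty) i)) d).getD x PySem.Set.empty
    = if x ∈ way then PySem.Set.add (d.getD x PySem.Set.empty) i else d.getD x PySem.Set.empty := by
  induction way generalizing d with
  | nil => simp
  | cons y ys ih =>
    simp only [List.foldl_cons, ih, PySem.Dict.getD_insert, List.mem_cons]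
    by_cases hxy : x = y
    · subst hxy
      by_cases hm : x ∈ ys <;> simp [hm]
    · simp [hxy]

lemma sig_occ_mem (ways : List (List Int)) (x y : Int) :
    y ∈ (sig_occ ways).getD x PySem.Set.empty
    ↔ ∃ k : Nat, ∃ _ : k < ways.length, x ∈ ways[k] ∧ y = (k : Int) := by
  suffices h : ∀ (ws : List (List Int)) (s : Int) (d : PySem.Dict Int (PySem.Set Int)),
      y ∈ ((PySem.List.enumerate ws s).foldl (fun d p =>
            p.2.foldl (fun d node =>
              d.insert node (PySem.Set.add (d.getD node PySem.Set.empty) p.1)) d) d).getD x PySem.Set.empty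
      ↔ y ∈ d.getD x PySem.Set.empty ∨ ∃ k : Nat, ∃ _ : k < ws.length, x ∈ ws[k] ∧ y = s + (k : Int) by
    have := h ways 0 PySem.Dict.empty
    simpa [sig_occ] using this
  intro ws
  induction ws with
  | nil => intro s d; simp [PySem.List.enumerate_nil]
  | cons w ws ih =>
    intro s d
    rw [PySem.List.enumerate_cons, List.foldl_cons, ih]
    rw [sig_occ_inner]
    constructor
    · rintro (hm | ⟨k, hk, hx, hy⟩)
      · by_cases hw : x ∈ w
        · simp only [hw, if_true, PySem.Set.mem_add] at hm
          rcases hm with hm | rfl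
          · exact Or.inl hm
          · exact Or.inr ⟨0, by simp, by simpa using hw, by simp⟩
        · simp only [hw, if_false] at hm
          exact Or.inl hm
      · exact Or.inr ⟨k + 1, by simpa using hk, by simpa using hx, by push_cast; omega⟩
    · rintro (hm | ⟨k, hk, hx, hy⟩)
      · by_cases hw : x ∈ w
        · exact Or.inl (by simp only [hw, if_true, PySem.Set.mem_add]; exact Or.inl hm)
        · exact Or.inl (by simpa [hw] using hm)
      · match k with
        | 0 =>
          refine Or.inl ?_
          simp only [List.getElem_cons_zero] at hx
          push_cast at hy
          simp only [hx, if_true, PySem.Set.mem_add]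
          exact Or.inr (by omega)
        | k + 1 =>
          refine Or.inr ⟨k, by simpa using hk, by simpa using hx, by push_cast at hy ⊢; omega⟩

lemma sig_contains_beq_iff (w : List Int) (a b : Int) :
    ((w.contains a == w.contains b) = true) ↔ (a ∈ w ↔ b ∈ w) := by
  simp [beq_iff_eq, List.contains_eq_mem, decide_eq_decide]

lemma sig_condB_eq (ways : List (List Int)) (node next : Int) :
    (next != node && PySem.Set.equal ((sig_occ ways).getD next PySem.Set.empty)
        ((sig_occ ways).getD node PySem.Set.empty))
    = sigCond ways node next := by
  unfold sigCond
  congr 1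
  rw [Bool.eq_iff_iff, PySem.Set.equal_iff, List.all_eq_true]
  constructor
  · intro h w hw
    rcases List.mem_iff_getElem.mp hw with ⟨k, hk, rfl⟩
    have hIff := h (k : Int)
    rw [sig_occ_mem, sig_occ_mem] at hIff
    rw [sig_contains_beq_iff]
    constructor
    · intro hn
      rcases hIff.mpr ⟨k, hk, hn, rfl⟩ with ⟨k', hk2, hx, he⟩
      have hkk : k' = k := by exact_mod_cast he.symm
      subst hkk; exact hx
    · intro hn
      rcases hIff.mp ⟨k, hk, hn, rfl⟩ with ⟨k', hk2, hx, he⟩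
      have hkk : k' = k := by exact_mod_cast he.symm
      subst hkk; exact hx
  · intro h y
    rw [sig_occ_mem, sig_occ_mem]
    constructor
    · rintro ⟨k, hk, hx, rfl⟩
      exact ⟨k, hk, (sig_contains_beq_iff _ _ _ |>.mp (h ways[k] (List.getElem_mem hk))).mpr hx, rfl⟩
    · rintro ⟨k, hk, hx, rfl⟩
      exact ⟨k, hk, (sig_contains_beq_iff _ _ _ |>.mp (h ways[k] (List.getElem_mem hk))).mp hx, rfl⟩

lemma sig_condA1 (ways : List (List Int)) (node next : Int) :
    ((ways.filter (fun way => way.contains node)).all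
        (fun way => (PySem.List.index? way next).isSome)
      && !(deep_in (ways.filter (fun way => !way.contains node)) next) && node != next)
    = sigCond ways node next := by
  unfold sigCond deep_in
  rw [Bool.eq_iff_iff]
  simp only [Bool.and_eq_true, Bool.not_eq_true', List.all_eq_true, List.any_eq_false,
    List.mem_filter, bne_iff_ne, PySem.List.index?_isSome_iff, List.contains_eq_mem,
    decide_eq_true_eq, decide_eq_false_iff_not, beq_iff_eq, decide_eq_decide]
  constructor
  · rintro ⟨⟨h1, h2⟩, h3⟩
    refine ⟨Ne.symm h3, fun w hw => ⟨fun hn => h1 w ⟨hw, hn⟩,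
      fun hn => by by_contra hnn; exact (h2 w ⟨hw, hnn⟩) hn⟩⟩
  · rintro ⟨h1, h2⟩
    exact ⟨⟨fun w hw => (h2 w hw.1).mp hw.2, fun w hw hn => hw.2 ((h2 w hw.1).mpr hn)⟩, Ne.symm h1⟩

lemma sig_condA2 (ways : List (List Int)) (path : List Int) (node next : Int)
    (hp : path ∈ ways) (hn : node ∈ path) (hx : next ∈ path)
    (hlen : ¬ (ways.filter (fun way => way.contains node)).length > 1) :
    (!((ways.filter (fun way => !way.contains node)).any
        (fun way => (PySem.List.index? way next).isSome)) && node != next)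
    = sigCond ways node next := by
  have hmem : path ∈ ways.filter (fun way => way.contains node) := by
    simp [List.mem_filter, hp, List.contains_eq_mem, hn]
  have hsing : ∀ w ∈ ways, node ∈ w → w = path := by
    intro w hw hnw
    have hwf : w ∈ ways.filter (fun way => way.contains node) := by
      simp [List.mem_filter, hw, List.contains_eq_mem, hnw]
    rcases hfe : ways.filter (fun way => way.contains node) with _ | ⟨a, t⟩
    · rw [hfe] at hwf; simp at hwf
    · rw [hfe] at hwf hmem hlen
      have ht : t = [] := by
        cases t with
        | nil => rfl
        | cons b t' => exfalso; apply hlen; simp only [List.length_cons]; omega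
      subst ht
      simp only [List.mem_singleton] at hwf hmem
      rw [hwf, hmem]
  unfold sigCond
  rw [Bool.eq_iff_iff]
  simp only [Bool.and_eq_true, Bool.not_eq_true', List.any_eq_false, List.all_eq_true,
    List.mem_filter, bne_iff_ne, PySem.List.index?_isSome_iff, List.contains_eq_mem,
    decide_eq_false_iff_not, beq_iff_eq, decide_eq_decide]
  constructor
  · rintro ⟨h1, h2⟩
    refine ⟨Ne.symm h2, fun w hw => ⟨fun hnw => ?_, fun hxw => ?_⟩⟩
    · rw [hsing w hw hnw]; exact hx
    · by_contra hnn
      exact (h1 w ⟨hw, hnn⟩) hxw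
  · rintro ⟨h1, h2⟩
    exact ⟨fun w hw hxw => hw.2 ((h2 w hw.1).mpr hxw), Ne.symm h1⟩

lemma sig_update_of_mem (s : PySem.Set (Int × Int)) (l : List (Int × Int))
    (h : ∀ e ∈ l, e ∈ s) : PySem.Set.update s l = s := by
  rw [PySem.Set.update_eq_append_filter]
  have hf : (PySem.Set.ofList l).filter (fun y => !(PySem.Set.contains s y)) = [] := by
    rw [List.filter_eq_nil_iff]
    intro e he
    have hm : e ∈ s := h e ((PySem.Set.mem_ofList _ _).mp he)
    simp only [PySem.Set.contains_eq_listContains, List.contains_eq_mem, hm, decide_true,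
      Bool.not_true, Bool.false_eq_true, not_false_eq_true]
  rw [hf, List.append_nil]

def sigStepB (ways : List (List Int)) (path : List Int)
    (st : List (Int × Int) × PySem.Set Int) (p : Int × Int) :
    List (Int × Int) × PySem.Set Int :=
  if PySem.Set.contains st.2 p.2 then st
  else (PySem.Set.update st.1 (sigEmit ways path p.1.toNat p.2), PySem.Set.add st.2 p.2)

lemma sig_pathA (ways : List (List Int)) (path : List Int) (hp : path ∈ ways)
    (acc : List (Int × Int)) :
    path.foldl (fun acc node =>
      let ways_with_node := ways.filter (fun way => way.contains node)
      let ways_without_node := ways.filter (fun way => !way.contains node)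
      let idx : Nat := (PySem.List.index? path node).getD 0
      if ways_with_node.length > 1 then
        (PySem.List.slice path (some ((idx : Int) + 1)) none).foldl (fun acc next_node =>
          let is_check := ways_with_node.all (fun way => (PySem.List.index? way next_node).isSome)
          if is_check && !(deep_in ways_without_node next_node) && node != next_node then
            PySem.Set.add acc (node, next_node)
          else acc) acc
      else
        (PySem.List.slice path (some ((idx : Int) + 1)) none).foldl (fun acc next_node =>
          let is_check := !(ways_without_node.any (fun way => (PySem.List.index? way next_node).isSome))
          if is_check && node != next_node then
            PySem.Set.add acc (node, next_node)
          else acc) acc) acc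
    = path.foldl (fun acc node =>
        PySem.Set.update acc (sigEmit ways path ((PySem.List.index? path node).getD 0) node)) acc := by
  apply PySem.List.foldl_congr_mem'
  intro node hn acc
  simp only []
  have hslice : PySem.List.slice path (some (((PySem.List.index? path node).getD 0 : Nat) + 1 : Int)) none
      = path.drop ((PySem.List.index? path node).getD 0 + 1) := by
    have h1 : (((PySem.List.index? path node).getD 0 : Nat) + 1 : Int)
        = (((PySem.List.index? path node).getD 0 + 1 : Nat) : Int) := by push_cast; ring
    rw [h1, PySem.List.slice_from_natCast]
  by_cases hb : (ways.filter (fun way => way.contains node)).length > 1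
  · rw [if_pos hb, hslice]
    refine Eq.trans (PySem.List.foldl_congr_mem' _ _
      (fun acc next => if sigCond ways node next then PySem.Set.add acc (node, next) else acc) _
      (fun next _ acc => by simp only []; rw [sig_condA1])) ?_
    rw [PySem.List.foldl_if_eq_foldl_filter, ← PySem.Set.update_map_eq_foldl_add]
    rfl
  · rw [if_neg hb, hslice]
    refine Eq.trans (PySem.List.foldl_congr_mem' _ _
      (fun acc next => if sigCond ways node next then PySem.Set.add acc (node, next) else acc) _
      (fun next hnext acc => by
        simp only []
        rw [sig_condA2 ways path node next hp hn (List.mem_of_mem_drop hnext) hb])) ?_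
    rw [PySem.List.foldl_if_eq_foldl_filter, ← PySem.Set.update_map_eq_foldl_add]
    rfl

lemma sig_pathB (ways : List (List Int)) (path : List Int)
    (res : List (Int × Int)) (seen : PySem.Set Int) :
    (PySem.List.enumerate path 0).foldl (fun st p =>
      if PySem.Set.contains st.2 p.2 then st
      else
        let o := (sig_occ ways).getD p.2 PySem.Set.empty
        ((PySem.List.slice path (some (p.1 + 1)) none).foldl (fun res next_node =>
            if next_node != p.2 && PySem.Set.equal ((sig_occ ways).getD next_node PySem.Set.empty) o then
              PySem.Set.add res (p.2, next_node)
            else res) st.1,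
         PySem.Set.add st.2 p.2)) (res, seen)
    = (PySem.List.enumerate path 0).foldl (sigStepB ways path) (res, seen) := by
  apply PySem.List.foldl_congr_mem'
  intro p hp st
  rcases (PySem.List.mem_enumerate_iff _ _ _).mp hp with ⟨k, hk, rfl⟩
  simp only [zero_add]
  unfold sigStepB
  by_cases hc : PySem.Set.contains st.2 path[k]
  · simp only [hc, if_true]
  · simp only [hc, if_false, Bool.false_eq_true]
    have hslice : PySem.List.slice path (some ((k : Int) + 1)) none = path.drop (k + 1) := by
      have h1 : ((k : Int) + 1) = ((k + 1 : Nat) : Int) := by push_cast; ring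
      rw [h1, PySem.List.slice_from_natCast]
    rw [hslice]
    refine Prod.ext ?_ rfl
    simp only []
    refine Eq.trans (PySem.List.foldl_congr_mem' _ _
      (fun acc next => if sigCond ways path[k] next then PySem.Set.add acc (path[k], next) else acc) _
      (fun next _ acc => by simp only []; rw [sig_condB_eq])) ?_
    rw [PySem.List.foldl_if_eq_foldl_filter, ← PySem.Set.update_map_eq_foldl_add]
    simp [sigEmit]

lemma sig_fold_eq (ways : List (List Int)) (path : List Int) :
    ∀ (rest pre : List Int) (res : List (Int × Int)),
      path = pre ++ rest →
      (∀ x ∈ pre, ∀ e ∈ sigEmit ways path ((PySem.List.index? path x).getD 0) x, e ∈ res) →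
      rest.foldl (fun acc node =>
          PySem.Set.update acc (sigEmit ways path ((PySem.List.index? path node).getD 0) node)) res
        = ((PySem.List.enumerate rest ((pre.length : Nat) : Int)).foldl (sigStepB ways path)
            (res, PySem.Set.ofList pre)).1 := by
  intro rest
  induction rest with
  | nil => intro pre res _ _; simp [PySem.List.enumerate_nil]
  | cons node rest ih =>
    intro pre res hpath hres
    rw [PySem.List.enumerate_cons, List.foldl_cons, List.foldl_cons]
    by_cases hm : node ∈ pre
    · have hstep : sigStepB ways path (res, PySem.Set.ofList pre) (((pre.length : Nat) : Int), node)
          = (res, PySem.Set.ofList pre) := by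
        unfold sigStepB; simp [hm]
      rw [hstep, sig_update_of_mem _ _ (hres node hm)]
      have h1 : path = (pre ++ [node]) ++ rest := by simpa using hpath
      have h2 := ih (pre ++ [node]) res h1 (by
        intro x hx e he
        rcases List.mem_append.mp hx with hx | hx
        · exact hres x hx e he
        · rw [List.mem_singleton] at hx; subst hx; exact hres x hm e he)
      rw [PySem.Set.ofList_append_singleton,
        PySem.Set.add_of_mem ((PySem.Set.mem_ofList _ _).mpr hm)] at h2
      have hlen : (((pre ++ [node]).length : Nat) : Int) = ((pre.length : Nat) : Int) + 1 := by
        simp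
      rw [hlen] at h2
      exact h2
    · have hidx : PySem.List.index? path node = some pre.length :=
        (PySem.List.index?_eq_some_iff _ _ _).mpr ⟨pre, rest, hpath, rfl, hm⟩
      have hstep : sigStepB ways path (res, PySem.Set.ofList pre) (((pre.length : Nat) : Int), node)
          = (PySem.Set.update res (sigEmit ways path pre.length node),
             PySem.Set.add (PySem.Set.ofList pre) node) := by
        unfold sigStepB; simp [hm]
      rw [hstep, hidx]
      simp only [Option.getD_some]
      have h1 : path = (pre ++ [node]) ++ rest := by simpa using hpath
      have h2 := ih (pre ++ [node]) (PySem.Set.update res (sigEmit ways path pre.length node)) h1 (by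
        intro x hx e he
        rcases List.mem_append.mp hx with hx | hx
        · exact (PySem.Set.mem_update _ _ _).mpr (Or.inl (hres x hx e he))
        · rw [List.mem_singleton] at hx; subst hx
          rw [hidx] at he
          exact (PySem.Set.mem_update _ _ _).mpr (Or.inr (by simpa using he)))
      rw [PySem.Set.ofList_append_singleton] at h2
      have hlen : (((pre ++ [node]).length : Nat) : Int) = ((pre.length : Nat) : Int) + 1 := by
        simp
      rw [hlen] at h2
      exact h2

-- ===== VERDICT (by name: the statement is the Claim_ definition above) =====
theorem search_isolated_graph_spec : Claim_equal_search_isolated_graph := by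
  intro ways _
  unfold Spec_search_isolated_graph search_isolated_graph search_isolated_graph_alt
  simp only []
  apply PySem.List.foldl_congr_mem'
  intro path hp acc
  rw [sig_pathA ways path hp acc, sig_pathB]
  have h := sig_fold_eq ways path path [] acc rfl (by intro x hx; simp at hx)
  simpa using h
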